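-- pv_equiv track=rewrite | github.com/Szymon-Glinka/skillsComp | maze/tests/findStart.py | check_repeats
-- ===== SOURCE A (Python) =====
-- def check_repeats(matrix):
--     counts = {}
--     for row in matrix:
--         for letter in row:
--             if letter != "#" and letter != " " and letter != "E":
--                 if letter in counts:
--                     counts[letter] += 1
--                 else:
--                     counts[letter] = 1
--                 if counts[letter] > 1:
--                     return "repeats"
--     return "no repeats"
-- ===== SOURCE B (Python) =====
-- def check_repeats(matrix):
--     letters = [letter for row in matrix for letter in row
--                if letter not in ("#", " ", "E")]
--     return "repeats" if len(set(letters)) != len(letters) else "no repeats"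
-- ===== Notes on version B (the rewrite author's own statement) =====
-- stated objective: simpler
-- what changed: Replaces A's incremental dict-counting with early return by a single flatten-and-filter comprehension followed by one cardinality comparison between the filtered list and its set.
import Mathlib
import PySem

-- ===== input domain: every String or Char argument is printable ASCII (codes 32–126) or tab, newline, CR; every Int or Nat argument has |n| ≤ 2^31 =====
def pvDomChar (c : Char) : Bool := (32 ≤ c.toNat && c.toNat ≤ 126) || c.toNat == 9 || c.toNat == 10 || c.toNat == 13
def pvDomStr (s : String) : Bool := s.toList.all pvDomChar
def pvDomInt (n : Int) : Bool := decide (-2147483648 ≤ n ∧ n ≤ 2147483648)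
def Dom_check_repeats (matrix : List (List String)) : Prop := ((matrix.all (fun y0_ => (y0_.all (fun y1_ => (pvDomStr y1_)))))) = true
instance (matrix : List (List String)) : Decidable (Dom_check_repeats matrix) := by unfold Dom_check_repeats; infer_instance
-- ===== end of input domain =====

-- B replaces A's incremental dict-counting with early return by a flatten-and-filter
-- comprehension followed by one set-vs-list cardinality comparison (simpler decomposition).

-- ===== PORT A =====
-- inner loop 'for letter in row' with the dict update and early return ("repeats" = none)
def aLetters : List String → PySem.Dict String Int → Option (PySem.Dict String Int)
  | [], counts => some counts
  | letter :: rest, counts =>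
    if letter ≠ "#" ∧ letter ≠ " " ∧ letter ≠ "E" then
      let counts' :=
        if counts.contains letter then counts.modify letter 0 (· + 1)
        else counts.insert letter 1
      if counts'.getD letter 0 > 1 then none
      else aLetters rest counts'
    else aLetters rest counts

-- outer loop 'for row in matrix'
def aRows : List (List String) → PySem.Dict String Int → Option (PySem.Dict String Int)
  | [], counts => some counts
  | row :: rest, counts =>
    match aLetters row counts with
    | none => none
    | some counts' => aRows rest counts'

def check_repeats (matrix : List (List String)) : String :=
  match aRows matrix PySem.Dict.empty with
  | none => "repeats"
  | some _ => "no repeats"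

-- ===== PORT B =====
def check_repeats_alt (matrix : List (List String)) : String :=
  let letters := matrix.flatMap (fun row =>
    row.filter (fun letter => !(letter == "#" || letter == " " || letter == "E")))
  if (PySem.Set.ofList letters).length ≠ letters.length then "repeats" else "no repeats"

-- ===== PRECONDITION & SPEC =====
def Spec_check_repeats (matrix : List (List String)) (out : String) : Prop := out = check_repeats_alt matrix
instance (matrix : List (List String)) (out : String) : Decidable (Spec_check_repeats matrix out) := by unfold Spec_check_repeats; infer_instance

-- ===== CLAIM (what is proved, stated in full; the proofs are below) =====
def Claim_equal_check_repeats : Prop := ∀ (matrix : List (List String)), Dom_check_repeats matrix → Spec_check_repeats matrix (check_repeats matrix)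

-- ===== LEMMAS AND PROOFS =====

-- the letters of one row that pass A's (= B's) filter
def filtRow (row : List String) : List String :=
  row.filter (fun letter => !(letter == "#" || letter == " " || letter == "E"))

def allLetters (matrix : List (List String)) : List String := matrix.flatMap filtRow

-- invariant of A's dict: every stored count is at least 1
def DInv (counts : PySem.Dict String Int) : Prop :=
  ∀ k, counts.contains k = true → 1 ≤ counts.getD k 0

lemma filtRow_cons (l : String) (rest : List String) :
    filtRow (l :: rest) =
      if l ≠ "#" ∧ l ≠ " " ∧ l ≠ "E" then l :: filtRow rest else filtRow rest := by
  by_cases h : l ≠ "#" ∧ l ≠ " " ∧ l ≠ "E"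
  · simp [filtRow, h.1, h.2.1, h.2.2]
  · have h' : l = "#" ∨ l = " " ∨ l = "E" := by tauto
    rcases h' with h' | h' | h' <;> subst h' <;> simp [filtRow]

lemma dinv_empty : DInv PySem.Dict.empty := by
  intro k hk
  simp [PySem.Dict.contains_empty] at hk

lemma dinv_insert_one (counts : PySem.Dict String Int) (l : String) (hinv : DInv counts) :
    DInv (counts.insert l 1) := by
  intro k hk
  rw [PySem.Dict.getD_insert]
  by_cases hkl : k = l
  · simp [hkl]
  · simp only [if_neg hkl]
    rw [PySem.Dict.contains_insert] at hk
    have : counts.contains k = true := by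
      simp only [Bool.or_eq_true, beq_iff_eq] at hk
      tauto
    exact hinv k this

lemma aLetters_none : ∀ (row : List String) (counts : PySem.Dict String Int),
    DInv counts →
    ¬ ((filtRow row).Nodup ∧ ∀ x ∈ filtRow row, counts.contains x = false) →
    aLetters row counts = none := by
  intro row
  induction row with
  | nil =>
    intro counts _ h
    exfalso; apply h
    constructor
    · simp [filtRow]
    · intro x hx; simp [filtRow] at hx
  | cons l rest ih =>
    intro counts hinv h
    by_cases hp : l ≠ "#" ∧ l ≠ " " ∧ l ≠ "E"
    · rw [filtRow_cons, if_pos hp] at h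
      by_cases hc : counts.contains l = true
      · have h1 : 1 ≤ counts.getD l 0 := hinv l hc
        have h2 : (counts.modify l 0 (· + 1)).getD l 0 = counts.getD l 0 + 1 :=
          PySem.Dict.getD_modify_self counts l 0 (· + 1)
        simp only [aLetters, if_pos hp, hc, if_true]
        rw [h2]
        have : counts.getD l 0 + 1 > 1 := by omega
        simp [this]
      · have hcf : counts.contains l = false := by
          cases hcl : counts.contains l
          · rfl
          · exact absurd hcl hc
        simp only [aLetters, if_pos hp, hcf, Bool.false_eq_true, if_false]
        have hg : (counts.insert l 1).getD l 0 = 1 := PySem.Dict.getD_insert_self counts l 1 0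
        rw [hg]
        simp only [gt_iff_lt, lt_irrefl, if_false]
        apply ih (counts.insert l 1) (dinv_insert_one counts l hinv)
        intro ⟨hnd, hall⟩
        apply h
        refine ⟨?_, ?_⟩
        · rw [List.nodup_cons]
          refine ⟨?_, hnd⟩
          intro hmem
          have := hall l hmem
          rw [PySem.Dict.contains_insert] at this
          simp at this
        · intro x hx
          rcases List.mem_cons.mp hx with hxl | hxr
          · subst hxl; exact hcf
          · have := hall x hxr
            rw [PySem.Dict.contains_insert] at this
            simp only [Bool.or_eq_false_iff] at this
            exact this.2
    · rw [filtRow_cons, if_neg hp] at h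
      simp only [aLetters, if_neg hp]
      exact ih counts hinv h

lemma aLetters_some : ∀ (row : List String) (counts : PySem.Dict String Int),
    DInv counts → (filtRow row).Nodup →
    (∀ x ∈ filtRow row, counts.contains x = false) →
    ∃ c', aLetters row counts = some c' ∧ DInv c' ∧
      ∀ x, (c'.contains x = true ↔ counts.contains x = true ∨ x ∈ filtRow row) := by
  intro row
  induction row with
  | nil =>
    intro counts hinv _ _
    exact ⟨counts, rfl, hinv, by intro x; simp [filtRow]⟩
  | cons l rest ih =>
    intro counts hinv hnd hall
    by_cases hp : l ≠ "#" ∧ l ≠ " " ∧ l ≠ "E"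
    · rw [filtRow_cons, if_pos hp] at hnd hall
      have hlmem : l ∈ l :: filtRow rest := List.mem_cons_self ..
      have hcf : counts.contains l = false := hall l hlmem
      have hlnr : l ∉ filtRow rest := (List.nodup_cons.mp hnd).1
      simp only [aLetters, if_pos hp, hcf, Bool.false_eq_true, if_false]
      have hg : (counts.insert l 1).getD l 0 = 1 := PySem.Dict.getD_insert_self counts l 1 0
      rw [hg]
      simp only [gt_iff_lt, lt_irrefl, if_false]
      have hall' : ∀ x ∈ filtRow rest, (counts.insert l 1).contains x = false := by
        intro x hx
        rw [PySem.Dict.contains_insert]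
        have hxl : ¬ (x = l) := fun hh => hlnr (hh ▸ hx)
        have := hall x (List.mem_cons_of_mem l hx)
        simp [hxl, this]
      obtain ⟨c', heq, hinv', hcont⟩ :=
        ih (counts.insert l 1) (dinv_insert_one counts l hinv) (List.nodup_cons.mp hnd).2 hall'
      refine ⟨c', heq, hinv', ?_⟩
      intro x
      rw [hcont x, PySem.Dict.contains_insert, filtRow_cons, if_pos hp]
      simp only [Bool.or_eq_true, beq_iff_eq, List.mem_cons]
      tauto
    · rw [filtRow_cons, if_neg hp] at hnd hall
      simp only [aLetters, if_neg hp]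
      obtain ⟨c', heq, hinv', hcont⟩ := ih counts hinv hnd hall
      refine ⟨c', heq, hinv', ?_⟩
      intro x
      rw [hcont x, filtRow_cons, if_neg hp]

lemma allLetters_cons (row : List String) (rest : List (List String)) :
    allLetters (row :: rest) = filtRow row ++ allLetters rest := by
  simp [allLetters, List.flatMap_cons]

lemma aRows_some : ∀ (matrix : List (List String)) (counts : PySem.Dict String Int),
    DInv counts → (allLetters matrix).Nodup →
    (∀ x ∈ allLetters matrix, counts.contains x = false) →
    ∃ c', aRows matrix counts = some c' := by
  intro matrix
  induction matrix with
  | nil => intro counts _ _ _; exact ⟨counts, rfl⟩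
  | cons row rest ih =>
    intro counts hinv hnd hall
    rw [allLetters_cons] at hnd hall
    have hndr : (filtRow row).Nodup := hnd.of_append_left
    have hndrest : (allLetters rest).Nodup := hnd.of_append_right
    have hdisj := List.Nodup.disjoint hnd
    obtain ⟨c', heq, hinv', hcont⟩ :=
      aLetters_some row counts hinv hndr
        (fun x hx => hall x (List.mem_append_left _ hx))
    simp only [aRows, heq]
    apply ih c' hinv' hndrest
    intro x hx
    cases hcx : c'.contains x
    · rfl
    · exfalso
      rcases (hcont x).mp hcx with hc | hm
      · rw [hall x (List.mem_append_right _ hx)] at hc; exact Bool.false_ne_true hc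
      · exact hdisj hm hx

lemma aRows_none : ∀ (matrix : List (List String)) (counts : PySem.Dict String Int),
    DInv counts →
    ¬ ((allLetters matrix).Nodup ∧ ∀ x ∈ allLetters matrix, counts.contains x = false) →
    aRows matrix counts = none := by
  intro matrix
  induction matrix with
  | nil =>
    intro counts _ h
    exfalso; apply h
    constructor
    · simp [allLetters]
    · intro x hx; simp [allLetters] at hx
  | cons row rest ih =>
    intro counts hinv h
    rw [allLetters_cons] at h
    by_cases hrow : (filtRow row).Nodup ∧ ∀ x ∈ filtRow row, counts.contains x = false
    · obtain ⟨c', heq, hinv', hcont⟩ := aLetters_some row counts hinv hrow.1 hrow.2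
      simp only [aRows, heq]
      apply ih c' hinv'
      intro ⟨hnd, hall⟩
      apply h
      have hnotin : ∀ x ∈ allLetters rest, counts.contains x = false ∧ x ∉ filtRow row := by
        intro x hx
        have hcx : c'.contains x = false := hall x hx
        constructor
        · cases hc : counts.contains x
          · rfl
          · exfalso
            have : c'.contains x = true := (hcont x).mpr (Or.inl hc)
            rw [hcx] at this; exact Bool.false_ne_true this
        · intro hm
          have : c'.contains x = true := (hcont x).mpr (Or.inr hm)
          rw [hcx] at this; exact Bool.false_ne_true this
      refine ⟨?_, ?_⟩
      · rw [List.nodup_append]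
        refine ⟨hrow.1, hnd, ?_⟩
        intro a ha b hb hab
        exact (hnotin b hb).2 (hab ▸ ha)
      · intro x hx
        rcases List.mem_append.mp hx with hl | hr
        · exact hrow.2 x hl
        · exact (hnotin x hr).1
    · have heq : aLetters row counts = none := aLetters_none row counts hinv hrow
      simp [aRows, heq]

lemma length_ofList_lt_of_not_nodup (xs : List String) (h : ¬ xs.Nodup) :
    (PySem.Set.ofList xs).length < xs.length := by
  induction xs with
  | nil => exact absurd List.nodup_nil h
  | cons x xs ih =>
    rw [PySem.Set.ofList_cons]
    have hle : ((PySem.Set.ofList xs).discard x).length ≤ (PySem.Set.ofList xs).length := by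
      simp only [PySem.Set.discard]
      exact List.length_filter_le _ _
    have hle2 : (PySem.Set.ofList xs).length ≤ xs.length := PySem.Set.length_ofList_le xs
    by_cases hx : x ∈ xs
    · have hmem : x ∈ PySem.Set.ofList xs := (PySem.Set.mem_ofList xs x).mpr hx
      have hlt : ((PySem.Set.ofList xs).discard x).length < (PySem.Set.ofList xs).length := by
        simp only [PySem.Set.discard]
        exact List.length_filter_lt_length_iff_exists.mpr ⟨x, hmem, by simp⟩
      simp only [List.length_cons]
      omega
    · have hxs : ¬ xs.Nodup := by
        rw [List.nodup_cons] at h; tauto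
      have := ih hxs
      simp only [List.length_cons]
      omega

-- ===== VERDICT (by name: the statement is the Claim_ definition above) =====
theorem check_repeats_spec : Claim_equal_check_repeats := by
  intro matrix _
  unfold Spec_check_repeats
  show check_repeats matrix =
    (if (PySem.Set.ofList (allLetters matrix)).length ≠ (allLetters matrix).length
     then "repeats" else "no repeats")
  by_cases hnd : (allLetters matrix).Nodup
  · obtain ⟨c', heq⟩ := aRows_some matrix PySem.Dict.empty dinv_empty hnd
      (fun x _ => PySem.Dict.contains_empty x)
    rw [PySem.Set.ofList_eq_self_of_nodup _ hnd]
    simp [check_repeats, heq]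
  · have heq : aRows matrix PySem.Dict.empty = none :=
      aRows_none matrix PySem.Dict.empty dinv_empty (fun ⟨h1, _⟩ => hnd h1)
    have hlt := length_ofList_lt_of_not_nodup _ hnd
    have hne : (PySem.Set.ofList (allLetters matrix)).length ≠ (allLetters matrix).length :=
      Nat.ne_of_lt hlt
    simp [check_repeats, heq, hne]
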